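-- pv_equiv track=rewrite | github.com/bangtugu/Algorithm | PROGRAMMERS/쌍둥이_빌딩_숲.py | solution
-- ===== SOURCE A (Python) =====
-- def solution(n, count):
--
--     table = [[0]*(n+1) for _ in range(n+1)]
--
--     table[1][1] = 1
--
--     for i in range(1, n):
--         for j in range(1, n):
--             table[i+1][j+1] += table[i][j]
--             table[i+1][j] += table[i][j]*i*2
--
--     '''
--     n,cnt -> n+1,cnt == 맨 앞을 제외한 모든 자리에 11을 꽂아넣는것과 같다. == n,cnt의 모든 경우(n,cnt)에 대해 n*2만큼 꽂아넣는 경우가 있음. == n+1,cnt = n,cnt*n*2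
--     n,cnt -> n+1,cnt+1 == 11을 맨 앞에 꽂아넣는것과 같다. == n,cnt의 모든 경우(n,cnt)만큼 꽂아넣는 경우가 있음. == n+1,cnt+1가 n,cnt를 포함 (위의 조건에 의해 n,cnt+1*n*2 또한 포함)
--     n+1,cnt+1 = n,cnt + n,cnt+1*n*2
--     '''
--
--     return table[n][count] % 1000000007
-- ===== SOURCE B (Python) =====
-- def solution(n, count):
--     # answer = coefficient of x^count in x * prod_{i=1}^{n-1} (x + 2i),
--     # computed by divide-and-conquer polynomial multiplication.
--     def mul(p, q):
--         return [sum(p[a] * q[k - a] for a in range(k + 1)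
--                     if a < len(p) and k - a < len(q))
--                 for k in range(len(p) + len(q) - 1)]
--
--     def prod(lo, hi):
--         # coefficients (low to high) of prod_{i=lo}^{hi-1} (x + 2*i)
--         if hi <= lo:
--             return [1]
--         if lo + 1 == hi:
--             return [2 * lo, 1]
--         mid = (lo + hi) // 2
--         return mul(prod(lo, mid), prod(mid, hi))
--
--     coeffs = [0] + prod(1, n)
--     return coeffs[count] % 1000000007
-- ===== Notes on version B (the rewrite author's own statement) =====
-- stated objective: alternative
-- what changed: Replaces the row-by-row DP table recurrence with a divide-and-conquer product of the linear polynomial factors (x+2i) via a generic convolution, reading the answer as a coefficient of x*prod(x+2i).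
import Mathlib
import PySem

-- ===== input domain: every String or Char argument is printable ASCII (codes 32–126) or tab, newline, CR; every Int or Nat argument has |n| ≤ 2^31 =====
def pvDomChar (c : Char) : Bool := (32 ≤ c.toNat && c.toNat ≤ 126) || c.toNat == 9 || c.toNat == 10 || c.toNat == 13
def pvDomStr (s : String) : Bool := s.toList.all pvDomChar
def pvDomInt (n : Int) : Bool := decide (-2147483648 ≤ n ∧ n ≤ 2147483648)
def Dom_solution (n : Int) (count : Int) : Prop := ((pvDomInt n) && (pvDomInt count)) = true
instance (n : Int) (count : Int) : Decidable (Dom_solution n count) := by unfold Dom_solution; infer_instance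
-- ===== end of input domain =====

-- B abandons A's DP table and instead multiplies the linear factors (x+2i) by divide and
-- conquer with a generic polynomial convolution; objective: alternative algorithm, same cost.

-- ===== PORT A =====
-- inner-loop body: table[i+1][j+1] += table[i][j]; table[i+1][j] += table[i][j]*i*2
def stepA (i : Int) (t : List (List Int)) (j : Int) : List (List Int) :=
  let t1 := PySem.List.pySetD t (i+1)
    (PySem.List.pySetD (PySem.List.pyGetD t (i+1) []) (j+1)
      (PySem.List.pyGetD (PySem.List.pyGetD t (i+1) []) (j+1) 0
        + PySem.List.pyGetD (PySem.List.pyGetD t i []) j 0))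
  PySem.List.pySetD t1 (i+1)
    (PySem.List.pySetD (PySem.List.pyGetD t1 (i+1) []) j
      (PySem.List.pyGetD (PySem.List.pyGetD t1 (i+1) []) j 0
        + PySem.List.pyGetD (PySem.List.pyGetD t1 i []) j 0 * i * 2))

def solution (n : Int) (count : Int) : Int :=
  let table : List (List Int) := List.replicate (n+1).toNat (List.replicate (n+1).toNat 0)
  let table := PySem.List.pySetD table 1
    (PySem.List.pySetD (PySem.List.pyGetD table 1 []) 1 1)
  let table := (PySem.List.pyRange 1 n 1).foldl
    (fun t i => (PySem.List.pyRange 1 n 1).foldl (stepA i) t) table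
  PySem.Int.mod (PySem.List.pyGetD (PySem.List.pyGetD table n []) count 0) 1000000007

-- ===== PORT B =====
-- mul(p, q): r[k] = sum of p[a]*q[k-a] over a in range(k+1) with both indices in range;
-- the Python guard 'a < len(p) and k - a < len(q)' is ported via getD 0 (out-of-range
-- terms contribute 0), exact.
def polymulB (p q : List Int) : List Int :=
  (List.range (p.length + q.length - 1)).map (fun k =>
    ((List.range (k + 1)).map (fun a => p.getD a 0 * q.getD (k - a) 0)).sum)

-- prod(lo, hi): coefficients (low to high) of prod_{i=lo}^{hi-1} (x + 2*i)
def dcprodB (lo hi : Int) : List Int :=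
  if _h1 : hi ≤ lo then [1]
  else if _h2 : lo + 1 = hi then [2 * lo, 1]
  else
    polymulB (dcprodB lo (PySem.Int.floordiv (lo + hi) 2))
             (dcprodB (PySem.Int.floordiv (lo + hi) 2) hi)
termination_by (hi - lo).toNat
decreasing_by
  · have h : lo + 1 ≤ PySem.Int.floordiv (lo + hi) 2 := by
      rw [PySem.Int.le_floordiv_iff_mul_le (by omega)]; omega
    have h' : PySem.Int.floordiv (lo + hi) 2 < hi := by
      rw [PySem.Int.floordiv_lt_iff_lt_mul (by omega)]; omega
    omega
  · have h : lo + 1 ≤ PySem.Int.floordiv (lo + hi) 2 := by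
      rw [PySem.Int.le_floordiv_iff_mul_le (by omega)]; omega
    omega

def solution_alt (n : Int) (count : Int) : Int :=
  let coeffs : List Int := [0] ++ dcprodB 1 n
  PySem.Int.mod (PySem.List.pyGetD coeffs count 0) 1000000007

-- ===== PRECONDITION & SPEC =====
-- Pre_ excludes exactly the inputs where the Python A raises IndexError (n < 1, or count
-- outside the valid index range -(n+1)..n of the length-(n+1) row).
def Pre_solution (n : Int) (count : Int) : Prop :=
  1 ≤ n ∧ -(n+1) ≤ count ∧ count ≤ n
instance (n : Int) (count : Int) : Decidable (Pre_solution n count) := by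
  unfold Pre_solution; infer_instance

def pvWitness_solution : Int × Int := (4, 2)

def Spec_solution (n : Int) (count : Int) (out : Int) : Prop := out = solution_alt n count
instance (n : Int) (count : Int) (out : Int) : Decidable (Spec_solution n count out) := by
  unfold Spec_solution; infer_instance

-- ===== CLAIM (what is proved, stated in full; the proofs are below) =====
def Claim_equal_solution : Prop := ∀ (n : Int) (count : Int), Dom_solution n count →
  Pre_solution n count → Spec_solution n count (solution n count)

-- ===== LEMMAS AND PROOFS =====

lemma getD_set {α : Type} (l : List α) (i j : ℕ) (a : α) (d : α) :
    (l.set i a).getD j d = if i = j ∧ i < l.length then a else l.getD j d := by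
  simp only [List.getD_eq_getElem?_getD, List.getElem?_set]
  by_cases h1 : i = j
  · subst h1
    by_cases h2 : i < l.length
    · simp [h2]
    · rw [List.getElem?_eq_none (by omega)]
      simp [h2]
  · simp [h1]

-- proof-side 1-D rolling view of A's inner loop: c ↦ coefficients of (x + 2i)·(poly of c)
def stepB (i : Int) (c : List Int) : List Int :=
  (List.range c.length).map (fun p =>
    (if p = 0 then 0 else c.getD (p-1) 0) + c.getD p 0 * i * 2)

lemma length_stepB (i : Int) (c : List Int) : (stepB i c).length = c.length := by
  simp [stepB]

lemma stepB_getD (i : Int) (c : List Int) (p : ℕ) (hp : p < c.length) :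
    (stepB i c).getD p 0 = (if p = 0 then 0 else c.getD (p-1) 0) + c.getD p 0 * i * 2 := by
  rw [List.getD_eq_getElem _ _ (by simpa [length_stepB] using hp)]
  simp [stepB]

lemma stepB_getD_ge (i : Int) (c : List Int) (p : ℕ) (hp : c.length ≤ p) :
    (stepB i c).getD p 0 = 0 := by
  rw [List.getD_eq_getElem?_getD, List.getElem?_eq_none (by simpa [length_stepB] using hp)]
  rfl

lemma stepA_spec (i j : Int) (hi : 1 ≤ i) (hj : 1 ≤ j)
    (t : List (List Int)) (hti : (i+1).toNat < t.length)
    (hrow : (j+1).toNat < (t.getD (i+1).toNat []).length) :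
    (stepA i t j).length = t.length ∧
    (∀ r, r ≠ (i+1).toNat → (stepA i t j).getD r [] = t.getD r []) ∧
    ((stepA i t j).getD (i+1).toNat []).length = (t.getD (i+1).toNat []).length ∧
    (∀ p : ℕ, ((stepA i t j).getD (i+1).toNat []).getD p 0 =
      (t.getD (i+1).toNat []).getD p 0
      + (if p = (j+1).toNat then (t.getD i.toNat []).getD j.toNat 0 else 0)
      + (if p = j.toNat then (t.getD i.toNat []).getD j.toNat 0 * i * 2 else 0)) := by
  have h0i : (0:Int) ≤ i := by omega
  have h0i1 : (0:Int) ≤ i+1 := by omega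
  have h0j : (0:Int) ≤ j := by omega
  have h0j1 : (0:Int) ≤ j+1 := by omega
  have hii : i.toNat ≠ (i+1).toNat := by omega
  have hjj : (j+1).toNat ≠ j.toNat := by omega
  set I := (i+1).toNat with hI
  set r : List Int := t.getD I [] with hr
  set old : List Int := t.getD i.toNat [] with hold
  have hstep : stepA i t j =
      t.set I ((r.set (j+1).toNat (r.getD (j+1).toNat 0 + old.getD j.toNat 0)).set j.toNat
        ((r.set (j+1).toNat (r.getD (j+1).toNat 0 + old.getD j.toNat 0)).getD j.toNat 0
          + old.getD j.toNat 0 * i * 2)) := by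
    simp only [stepA,
      PySem.List.pySetD_of_nonneg _ _ h0i1, PySem.List.pySetD_of_nonneg _ _ h0j1,
      PySem.List.pySetD_of_nonneg _ _ h0j,
      PySem.List.pyGetD_of_nonneg _ _ h0i1, PySem.List.pyGetD_of_nonneg _ _ h0j1,
      PySem.List.pyGetD_of_nonneg _ _ h0j, PySem.List.pyGetD_of_nonneg _ _ h0i]
    rw [getD_set t I _ _ [], if_pos ⟨rfl, hti⟩, getD_set t I i.toNat _ [],
      if_neg (by simp [hii.symm]), List.set_set]
  set v1 : Int := r.getD (j+1).toNat 0 + old.getD j.toNat 0 with hv1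
  have hr1j : (r.set (j+1).toNat v1).getD j.toNat 0 = r.getD j.toNat 0 := by
    rw [getD_set, if_neg (by simp [hjj])]
  refine ⟨?_, ?_, ?_, ?_⟩
  · rw [hstep]; simp
  · intro s hs
    rw [hstep, getD_set, if_neg (by rintro ⟨h,_⟩; exact hs h.symm)]
  · rw [hstep, getD_set, if_pos ⟨rfl, hti⟩]; simp
  · intro p
    rw [hstep, getD_set t I I _ [], if_pos ⟨rfl, hti⟩, hr1j,
      getD_set (r.set (j+1).toNat v1) j.toNat p _ 0, getD_set r (j+1).toNat p v1 0]
    have hjr : j.toNat < r.length := by omega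
    have hlen2 : (r.set (j+1).toNat v1).length = r.length := by simp
    by_cases hp1 : p = j.toNat <;> by_cases hp2 : p = (j+1).toNat
    · omega
    · subst hp1
      rw [if_pos ⟨rfl, by omega⟩, if_neg (by omega), if_pos rfl]
      ring
    · subst hp2
      rw [if_neg (by omega), if_pos ⟨rfl, by omega⟩, if_pos rfl, if_neg (by omega), hv1]
      ring
    · rw [if_neg (by omega), if_neg (by omega), if_neg hp2, if_neg hp1]
      ring

lemma innerA_spec (n i : Int) (hi : 1 ≤ i) (hin : i < n) :
    ∀ (fuel : ℕ) (m : Int), (n - m).toNat = fuel → 1 ≤ m →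
    ∀ (t : List (List Int)), t.length = (n+1).toNat →
    (∀ r, r < t.length → (t.getD r []).length = (n+1).toNat) →
    (((PySem.List.pyRange m n 1).foldl (stepA i) t).length = t.length ∧
     (∀ r, r ≠ (i+1).toNat → ((PySem.List.pyRange m n 1).foldl (stepA i) t).getD r [] = t.getD r []) ∧
     (((PySem.List.pyRange m n 1).foldl (stepA i) t).getD (i+1).toNat []).length
        = (t.getD (i+1).toNat []).length ∧
     (∀ p : ℕ, (p:Int) ≤ n →
       (((PySem.List.pyRange m n 1).foldl (stepA i) t).getD (i+1).toNat []).getD p 0 =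
         (t.getD (i+1).toNat []).getD p 0
         + (if m + 1 ≤ (p:Int) ∧ (p:Int) ≤ n then (t.getD i.toNat []).getD (p-1) 0 else 0)
         + (if m ≤ (p:Int) ∧ (p:Int) ≤ n - 1 then (t.getD i.toNat []).getD p 0 * i * 2 else 0))) := by
  intro fuel
  induction fuel with
  | zero =>
    intro m hfuel hm t hlen hrows
    rw [PySem.List.pyRange_one_eq_nil (by omega)]
    refine ⟨rfl, fun _ _ => rfl, rfl, fun p hp => ?_⟩
    simp only [List.foldl_nil]
    rw [if_neg (by omega), if_neg (by omega)]
    ring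
  | succ f ih =>
    intro m hfuel hm t hlen hrows
    have hmn : m < n := by omega
    rw [PySem.List.pyRange_one_cons (by omega)]
    simp only [List.foldl_cons]
    have hti : (i+1).toNat < t.length := by omega
    have hrowlen : (t.getD (i+1).toNat []).length = (n+1).toNat := hrows _ hti
    have hrowb : (m+1).toNat < (t.getD (i+1).toNat []).length := by omega
    obtain ⟨s1, s2, s3, s4⟩ := stepA_spec i m hi hm t hti hrowb
    have hrows' : ∀ r, r < (stepA i t m).length → ((stepA i t m).getD r []).length = (n+1).toNat := by
      intro r hr
      rw [s1] at hr
      by_cases hr' : r = (i+1).toNat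
      · rw [hr', s3, hrowlen]
      · rw [s2 r hr']
        exact hrows r hr
    obtain ⟨i1, i2, i3, i4⟩ := ih (m+1) (by omega) (by omega) (stepA i t m) (by rw [s1, hlen]) hrows'
    have hio : i.toNat ≠ (i+1).toNat := by omega
    refine ⟨by rw [i1, s1], ?_, by rw [i3, s3], ?_⟩
    · intro r hr
      rw [i2 r hr, s2 r hr]
    · intro p hp
      rw [i4 p hp, s4 p, s2 i.toNat hio]
      by_cases hc1 : p = (m+1).toNat
      · have e1 : p - 1 = m.toNat := by omega
        rw [if_pos hc1, if_neg (show ¬ p = m.toNat by omega),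
          if_neg (show ¬(m + 1 + 1 ≤ (p:Int) ∧ (p:Int) ≤ n) by omega),
          if_pos (show m + 1 ≤ (p:Int) ∧ (p:Int) ≤ n by omega), e1]
        simp only [show (m + 1 ≤ (p:Int) ∧ (p:Int) ≤ n - 1) ↔ (m ≤ (p:Int) ∧ (p:Int) ≤ n - 1) from by omega]
        ring
      · by_cases hc2 : p = m.toNat
        · subst hc2
          rw [if_neg hc1, if_pos rfl,
            if_neg (show ¬(m + 1 + 1 ≤ ((m.toNat:ℕ):Int) ∧ ((m.toNat:ℕ):Int) ≤ n) by omega),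
            if_neg (show ¬(m + 1 ≤ ((m.toNat:ℕ):Int) ∧ ((m.toNat:ℕ):Int) ≤ n - 1) by omega),
            if_neg (show ¬(m + 1 ≤ ((m.toNat:ℕ):Int) ∧ ((m.toNat:ℕ):Int) ≤ n) by omega),
            if_pos (show m ≤ ((m.toNat:ℕ):Int) ∧ ((m.toNat:ℕ):Int) ≤ n - 1 by omega)]
          ring
        · rw [if_neg hc1, if_neg hc2]
          simp only [show (m + 1 + 1 ≤ (p:Int) ∧ (p:Int) ≤ n) ↔ (m + 1 ≤ (p:Int) ∧ (p:Int) ≤ n) from by omega,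
            show (m + 1 ≤ (p:Int) ∧ (p:Int) ≤ n - 1) ↔ (m ≤ (p:Int) ∧ (p:Int) ≤ n - 1) from by omega]
          ring

lemma getD_replicate_zero (N q : ℕ) : (List.replicate N (0:Int)).getD q 0 = 0 := by
  simp only [List.getD_eq_getElem?_getD, List.getElem?_replicate]
  split <;> simp

lemma getD_of_le {α : Type} (l : List α) (q : ℕ) (d : α) (h : l.length ≤ q) : l.getD q d = d := by
  simp only [List.getD_eq_getElem?_getD]
  rw [List.getElem?_eq_none (by omega)]
  rfl

lemma outer_spec (n : Int) (hn : 1 ≤ n) :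
    ∀ (fuel : ℕ) (k : Int), (n - k).toNat = fuel → 1 ≤ k → k ≤ n →
    ∀ (t : List (List Int)) (c : List Int),
    t.length = (n+1).toNat →
    (∀ r, r < t.length → (t.getD r []).length = (n+1).toNat) →
    t.getD k.toNat [] = c →
    c.length = (n+1).toNat →
    c.getD 0 0 = 0 →
    (∀ p : ℕ, k < (p:Int) → c.getD p 0 = 0) →
    (∀ r, k.toNat < r → r < t.length → t.getD r [] = List.replicate (n+1).toNat 0) →
    ((PySem.List.pyRange k n 1).foldl
        (fun t i => (PySem.List.pyRange 1 n 1).foldl (stepA i) t) t).getD n.toNat []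
      = (PySem.List.pyRange k n 1).foldl (fun c i => stepB i c) c := by
  intro fuel
  induction fuel with
  | zero =>
    intro k hfuel h1 hkn t c hlen hrows htk hclen hc0 hctail hrepl
    have hnil : PySem.List.pyRange k n 1 = [] := PySem.List.pyRange_one_eq_nil (by omega)
    rw [hnil]
    simp only [List.foldl_nil]
    rw [← htk]
    congr 1
    omega
  | succ f ih =>
    intro k hfuel h1 hkn t c hlen hrows htk hclen hc0 hctail hrepl
    have hkltn : k < n := by omega
    have hcons : PySem.List.pyRange k n 1 = k :: PySem.List.pyRange (k+1) n 1 :=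
      PySem.List.pyRange_one_cons (by omega)
    rw [hcons]
    simp only [List.foldl_cons]
    obtain ⟨a1, a2, a3, a4⟩ :=
      innerA_spec n k h1 hkltn ((n-1).toNat) 1 (by omega) (by omega) t hlen hrows
    have hk1len : (k+1).toNat < t.length := by omega
    have hrowk1 : t.getD (k+1).toNat [] = List.replicate (n+1).toNat 0 :=
      hrepl _ (by omega) (by omega)
    have hrow_eq : ((PySem.List.pyRange 1 n 1).foldl (stepA k) t).getD (k+1).toNat []
        = stepB k c := by
      apply List.ext_getElem
      · rw [a3, hrowk1, length_stepB, hclen]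
        simp
      · intro q hq1 hq2
        have hql : q < (n+1).toNat := by
          rw [length_stepB, hclen] at hq2
          omega
        rw [← List.getD_eq_getElem _ 0 hq1, ← List.getD_eq_getElem _ 0 hq2,
          a4 q (by omega), stepB_getD k c q (by omega), hrowk1, getD_replicate_zero, htk]
        by_cases h0 : q = 0
        · subst h0
          rw [if_neg (by omega), if_neg (by omega), if_pos rfl, hc0]
          ring
        · by_cases hqn : (q:Int) = n
          · rw [if_pos (show 1 + 1 ≤ (q:Int) ∧ (q:Int) ≤ n by omega),
              if_neg (show ¬(1 ≤ (q:Int) ∧ (q:Int) ≤ n - 1) by omega),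
              if_neg h0, hctail q (by omega)]
            ring
          · by_cases hq1' : q = 1
            · subst hq1'
              rw [if_neg (show ¬(1 + 1 ≤ ((1:ℕ):Int) ∧ ((1:ℕ):Int) ≤ n) by omega),
                if_pos (show 1 ≤ ((1:ℕ):Int) ∧ ((1:ℕ):Int) ≤ n - 1 by omega),
                if_neg h0, show (1 - 1 : ℕ) = 0 from rfl, hc0]
              ring
            · rw [if_pos (show 1 + 1 ≤ (q:Int) ∧ (q:Int) ≤ n by omega),
                if_pos (show 1 ≤ (q:Int) ∧ (q:Int) ≤ n - 1 by omega),
                if_neg h0]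
              ring
    refine ih (k+1) (by omega) (by omega) (by omega)
      ((PySem.List.pyRange 1 n 1).foldl (stepA k) t) (stepB k c)
      (by rw [a1, hlen]) ?_ hrow_eq (by rw [length_stepB, hclen]) ?_ ?_ ?_
    · intro r hr
      rw [a1] at hr
      by_cases hr' : r = (k+1).toNat
      · rw [hr', a3, hrowk1]
        simp
      · rw [a2 r hr']
        exact hrows r hr
    · rw [stepB_getD k c 0 (by omega), hc0]
      simp
    · intro p hp
      by_cases hpl : p < c.length
      · rw [stepB_getD k c p hpl, hctail p (by omega)]
        have : (if p = 0 then 0 else c.getD (p-1) 0) = 0 := by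
          rw [if_neg (by omega), hctail (p-1) (by omega)]
        rw [this]
        ring
      · rw [getD_of_le _ _ _ (by rw [length_stepB]; omega)]
    · intro r hr1 hr2
      rw [a1] at hr2
      rw [a2 r (by omega)]
      exact hrepl r (by omega) hr2

lemma getD_replicate {α : Type} (N q : ℕ) (a d : α) :
    (List.replicate N a).getD q d = if q < N then a else d := by
  simp only [List.getD_eq_getElem?_getD, List.getElem?_replicate]
  split <;> simp

-- ---------- polynomial view ----------

noncomputable def facProd (lo hi : Int) : Polynomial Int :=
  ∏ i ∈ Finset.Ico lo hi, (Polynomial.X + Polynomial.C (2*i))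

lemma natDegree_facProd (lo hi : Int) : (facProd lo hi).natDegree ≤ (hi - lo).toNat := by
  unfold facProd
  refine le_trans (Polynomial.natDegree_prod_le _ _) ?_
  have hb : ∀ i ∈ Finset.Ico lo hi, (Polynomial.X + Polynomial.C (2*i)).natDegree ≤ 1 :=
    fun i _ => le_of_eq (Polynomial.natDegree_X_add_C _)
  refine le_trans (Finset.sum_le_card_nsmul _ _ 1 hb) ?_
  simp [Int.card_Ico]

lemma facProd_split (lo mid hi : Int) (h1 : lo ≤ mid) (h2 : mid ≤ hi) :
    facProd lo hi = facProd lo mid * facProd mid hi := by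
  unfold facProd
  rw [← Finset.Ico_union_Ico_eq_Ico h1 h2,
    Finset.prod_union (Finset.Ico_disjoint_Ico_consecutive lo mid hi)]

lemma facProd_succ (m : Int) (hm : 1 ≤ m) :
    facProd 1 (m+1) = facProd 1 m * (Polynomial.X + Polynomial.C (2*m)) := by
  rw [facProd_split 1 m (m+1) hm (by omega)]
  congr 1
  unfold facProd
  have : Finset.Ico m (m+1) = {m} := by
    ext x
    simp [Finset.mem_Ico]
    omega
  rw [this, Finset.prod_singleton]

lemma sum_map_range (f : ℕ → Int) (k : ℕ) :
    ((List.range k).map f).sum = ∑ a ∈ Finset.range k, f a := by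
  induction k with
  | zero => simp
  | succ m ih =>
    rw [List.range_succ, List.map_append, List.sum_append, Finset.sum_range_succ, ih]
    simp

lemma polymulB_length (p q : List Int) :
    (polymulB p q).length = p.length + q.length - 1 := by
  simp [polymulB]

lemma polymulB_coeff (p q : List Int) (P Q : Polynomial Int)
    (hp1 : 1 ≤ p.length) (hq1 : 1 ≤ q.length)
    (hp : ∀ a : ℕ, p.getD a 0 = P.coeff a) (hq : ∀ b : ℕ, q.getD b 0 = Q.coeff b) :
    ∀ k : ℕ, (polymulB p q).getD k 0 = (P * Q).coeff k := by
  intro k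
  have hPz : ∀ a : ℕ, p.length ≤ a → P.coeff a = 0 := by
    intro a ha
    rw [← hp a, getD_of_le _ _ _ ha]
  have hQz : ∀ b : ℕ, q.length ≤ b → Q.coeff b = 0 := by
    intro b hb
    rw [← hq b, getD_of_le _ _ _ hb]
  have hsum : (P * Q).coeff k = ∑ a ∈ Finset.range (k+1), P.coeff a * Q.coeff (k - a) := by
    rw [Polynomial.coeff_mul, Finset.Nat.sum_antidiagonal_eq_sum_range_succ_mk]
  by_cases hk : k < p.length + q.length - 1
  · rw [List.getD_eq_getElem _ 0 (by rw [polymulB_length]; omega)]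
    simp only [polymulB, List.getElem_map, List.getElem_range]
    rw [hsum, sum_map_range]
    exact Finset.sum_congr rfl (fun a _ => by rw [hp, hq])
  · rw [getD_of_le _ _ _ (by rw [polymulB_length]; omega), hsum]
    symm
    apply Finset.sum_eq_zero
    intro a ha
    simp only [Finset.mem_range] at ha
    by_cases hap : p.length ≤ a
    · rw [hPz a hap, zero_mul]
    · rw [hQz (k - a) (by omega), mul_zero]

lemma dcprodB_spec : ∀ (fuel : ℕ) (lo hi : Int), (hi - lo).toNat ≤ fuel →
    (dcprodB lo hi).length = (hi - lo).toNat + 1 ∧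
    (∀ p : ℕ, (dcprodB lo hi).getD p 0 = (facProd lo hi).coeff p) := by
  intro fuel
  induction fuel with
  | zero =>
    intro lo hi hf
    rw [dcprodB]
    have hle : hi ≤ lo := by omega
    rw [dif_pos hle]
    constructor
    · simp; omega
    · intro p
      have : facProd lo hi = 1 := by
        unfold facProd
        rw [Finset.Ico_eq_empty (by omega), Finset.prod_empty]
      rw [this, Polynomial.coeff_one]
      cases p with
      | zero => simp
      | succ q => simp
  | succ f ih =>
    intro lo hi hf
    rw [dcprodB]
    by_cases hle : hi ≤ lo
    · rw [dif_pos hle]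
      constructor
      · simp; omega
      · intro p
        have : facProd lo hi = 1 := by
          unfold facProd
          rw [Finset.Ico_eq_empty (by omega), Finset.prod_empty]
        rw [this, Polynomial.coeff_one]
        cases p with
        | zero => simp
        | succ q => simp
    · rw [dif_neg hle]
      by_cases h2 : lo + 1 = hi
      · rw [dif_pos h2]
        constructor
        · simp; omega
        · intro p
          have : facProd lo hi = Polynomial.X + Polynomial.C (2*lo) := by
            unfold facProd
            have : Finset.Ico lo hi = {lo} := by
              ext x
              simp [Finset.mem_Ico]
              omega
            rw [this, Finset.prod_singleton]
          rw [this]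
          match p with
          | 0 => simp
          | 1 =>
            have hg : ([2*lo, 1] : List Int).getD 1 0 = 1 := rfl
            rw [hg, Polynomial.coeff_add, Polynomial.coeff_X_one, Polynomial.coeff_C,
              if_neg one_ne_zero, add_zero]
          | (q+2) =>
            rw [getD_of_le _ _ _ (by simp)]
            rw [Polynomial.coeff_add, Polynomial.coeff_X, Polynomial.coeff_C]
            simp
      · rw [dif_neg h2]
        set mid := PySem.Int.floordiv (lo + hi) 2 with hmid
        have hb1 : lo + 1 ≤ mid := by
          rw [hmid, PySem.Int.le_floordiv_iff_mul_le (by omega)]; omega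
        have hb2 : mid < hi := by
          rw [hmid, PySem.Int.floordiv_lt_iff_lt_mul (by omega)]; omega
        obtain ⟨l1, c1⟩ := ih lo mid (by omega)
        obtain ⟨l2, c2⟩ := ih mid hi (by omega)
        constructor
        · rw [polymulB_length, l1, l2]
          omega
        · intro p
          rw [polymulB_coeff _ _ (facProd lo mid) (facProd mid hi)
            (by omega) (by omega) c1 c2 p,
            ← facProd_split lo mid hi (by omega) (by omega)]

-- the rolling fold computes the coefficients of X * facProd 1 n
lemma foldB_coeff (n : Int) (hn : 1 ≤ n) :
    ∀ (fuel : ℕ) (m : Int), (n - m).toNat = fuel → 1 ≤ m → m ≤ n →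
    ∀ c : List Int, c.length = (n+1).toNat →
    (∀ p : ℕ, c.getD p 0 = (Polynomial.X * facProd 1 m).coeff p) →
    (∀ p : ℕ, ((PySem.List.pyRange m n 1).foldl (fun c i => stepB i c) c).getD p 0
      = (Polynomial.X * facProd 1 n).coeff p) := by
  intro fuel
  induction fuel with
  | zero =>
    intro m hfuel hm hmn c hclen hc p
    have : m = n := by omega
    subst this
    rw [PySem.List.pyRange_one_eq_nil (by omega)]
    exact hc p
  | succ f ih =>
    intro m hfuel hm hmn c hclen hc
    have hmn' : m < n := by omega
    rw [PySem.List.pyRange_one_cons (by omega)]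
    simp only [List.foldl_cons]
    apply ih (m+1) (by omega) (by omega) (by omega)
    · rw [length_stepB, hclen]
    · intro p
      have hkey : Polynomial.X * facProd 1 (m+1)
          = (Polynomial.X * facProd 1 m) * Polynomial.X
            + Polynomial.C (2*m) * (Polynomial.X * facProd 1 m) := by
        rw [facProd_succ m hm]
        ring
      by_cases hp : p < c.length
      · rw [stepB_getD m c p hp, hkey, Polynomial.coeff_add, Polynomial.coeff_C_mul]
        cases p with
        | zero =>
          rw [if_pos rfl, hc 0]
          have h0 : ((Polynomial.X * facProd 1 m) * Polynomial.X).coeff 0 = 0 := by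
            rw [Polynomial.mul_coeff_zero, Polynomial.coeff_X_zero, mul_zero]
          rw [h0]
          ring
        | succ q =>
          rw [if_neg (by omega), Polynomial.coeff_mul_X]
          simp only [Nat.add_sub_cancel]
          rw [hc q, hc (q+1)]
          ring
      · rw [stepB_getD_ge m c p (by omega)]
        symm
        apply Polynomial.coeff_eq_zero_of_natDegree_lt
        calc (Polynomial.X * facProd 1 (m+1)).natDegree
            ≤ Polynomial.X.natDegree + (facProd 1 (m+1)).natDegree :=
              Polynomial.natDegree_mul_le
          _ ≤ 1 + (m + 1 - 1).toNat := by
              have := natDegree_facProd 1 (m+1)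
              simp only [Polynomial.natDegree_X]
              omega
          _ < p := by omega

-- B's coefficient list also lists the coefficients of X * facProd 1 n
lemma altList_coeff (n : Int) (_hn : 1 ≤ n) (p : ℕ) :
    ([0] ++ dcprodB 1 n).getD p 0 = (Polynomial.X * facProd 1 n).coeff p := by
  obtain ⟨-, hc⟩ := dcprodB_spec (n - 1).toNat 1 n (by omega)
  cases p with
  | zero =>
    rw [Polynomial.mul_coeff_zero, Polynomial.coeff_X_zero, zero_mul]
    rfl
  | succ q =>
    have : ([0] ++ dcprodB 1 n).getD (q+1) 0 = (dcprodB 1 n).getD q 0 := by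
      simp [List.getD_eq_getElem?_getD]
    rw [this, hc q, Polynomial.coeff_X_mul]

lemma foldB_length (l : List Int) : ∀ c : List Int,
    (l.foldl (fun c i => stepB i c) c).length = c.length := by
  induction l with
  | nil => intro c; rfl
  | cons x xs ih =>
    intro c
    simp only [List.foldl_cons]
    rw [ih, length_stepB]

lemma fold_eq_altList (n : Int) (hn : 1 ≤ n) :
    (PySem.List.pyRange 1 n 1).foldl (fun c i => stepB i c)
        ((List.replicate (n+1).toNat (0:Int)).set 1 1)
      = [0] ++ dcprodB 1 n := by
  have hN : 2 ≤ (n+1).toNat := by omega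
  have hinit : ∀ p : ℕ, ((List.replicate (n+1).toNat (0:Int)).set 1 1).getD p 0
      = (Polynomial.X * facProd 1 1).coeff p := by
    intro p
    have hfac : facProd 1 1 = 1 := by
      unfold facProd
      rw [Finset.Ico_self, Finset.prod_empty]
    rw [hfac, mul_one, Polynomial.coeff_X, getD_set]
    by_cases h1 : p = 1
    · rw [if_pos (by constructor <;> simp [h1, List.length_replicate] <;> omega),
        if_pos h1.symm]
    · rw [if_neg (by rintro ⟨h,-⟩; exact h1 h.symm), getD_replicate_zero,
        if_neg (fun h => h1 h.symm)]
  have hcoeff := foldB_coeff n hn (n-1).toNat 1 (by omega) (by omega) hn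
    ((List.replicate (n+1).toNat (0:Int)).set 1 1) (by simp) hinit
  obtain ⟨hdl, -⟩ := dcprodB_spec (n - 1).toNat 1 n (by omega)
  apply List.ext_getElem
  · rw [foldB_length]
    simp only [List.length_set, List.length_replicate, List.length_append,
      List.length_singleton, hdl]
    omega
  · intro q hq1 hq2
    rw [← List.getD_eq_getElem _ 0 hq1, ← List.getD_eq_getElem _ 0 hq2,
      hcoeff q, altList_coeff n hn q]

-- ===== VERDICT (by name: the statement is the Claim_ definition above) =====
theorem solution_spec : Claim_equal_solution := by
  unfold Claim_equal_solution Spec_solution Pre_solution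
  intro n count _ hpre
  obtain ⟨hn, -, -⟩ := hpre
  simp only [solution, solution_alt]
  have h01 : (0:Int) ≤ 1 := by omega
  have hN : 2 ≤ (n+1).toNat := by omega
  simp only [PySem.List.pySetD_of_nonneg _ _ h01, PySem.List.pyGetD_of_nonneg _ _ h01,
    PySem.List.pyGetD_of_nonneg _ _ (show (0:Int) ≤ n by omega), Int.toNat_one]
  rw [getD_replicate _ 1 _ [], if_pos (by omega)]
  have key := outer_spec n hn ((n-1).toNat) 1 (by omega) (by omega) hn
    ((List.replicate (n+1).toNat (List.replicate (n+1).toNat (0:Int))).set 1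
      ((List.replicate (n+1).toNat (0:Int)).set 1 1))
    ((List.replicate (n+1).toNat (0:Int)).set 1 1)
    (by simp)
    (by
      intro r hr
      simp only [List.length_set, List.length_replicate] at hr
      rw [getD_set]
      by_cases hr1 : r = 1
      · rw [if_pos (by simp [hr1, List.length_replicate]; omega)]
        simp
      · rw [if_neg (by rintro ⟨h,-⟩; exact hr1 h.symm), getD_replicate _ r _ [], if_pos hr]
        simp)
    (by
      rw [Int.toNat_one, getD_set, if_pos (by simp [List.length_replicate]; omega)])
    (by simp)
    (by rw [getD_set, if_neg (by omega), getD_replicate_zero])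
    (by
      intro p hp
      rw [getD_set, if_neg (by rintro ⟨h,-⟩; omega), getD_replicate_zero])
    (by
      intro r hr1 hr2
      simp only [List.length_set, List.length_replicate] at hr2
      rw [getD_set, if_neg (by rintro ⟨h,-⟩; omega), getD_replicate _ r _ [], if_pos hr2])
  rw [key, fold_eq_altList n hn]
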